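-- pv_equiv track=rewrite | github.com/pranavjawale01/LeetCode-GFG | 1717-maximum-score-from-removing-substrings/1717-maximum-score-from-removing-substrings.py | solve
-- ===== SOURCE A (Python) =====
-- def solve(s: str, targetStr: str, points: int) -> int:
--     totalPoints = 0
--     st = []
--     for char in s:
--         if st and char == targetStr[1] and st[-1] == targetStr[0]:
--             st.pop()
--             totalPoints += points
--         else:
--             st.append(char)
--
--     s = ''.join(st)
--     return totalPoints, s
-- ===== SOURCE B (Python) =====
-- def solve(s: str, targetStr: str, points: int) -> int:
--     pat = targetStr[:2]  # A only ever compares against targetStr[0] and targetStr[1]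
--     total = 0
--     while pat in s:
--         total += s.count(pat) * points
--         s = s.replace(pat, '')
--     return total, s
-- ===== Notes on version B (the rewrite author's own statement) =====
-- stated objective: faster
-- what changed: Replaces the one-pass character stack with repeated global passes: pat = targetStr[:2] (the only characters A reads), then while pat occurs add s.count(pat)*points and delete all non-overlapping occurrences with str.replace; single-pattern deletion is confluent, so remainder and removal count match the stack's, and the C-implemented count/replace passes beat A's per-character Python loop.
-- outside the precondition, e.g. on solve('z', 'z', 3): A returns (0, 'z'), B returns (3, ''); on solve('', '', 1): A returns (0, ''), B does not finish within the time limit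
import Mathlib
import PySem

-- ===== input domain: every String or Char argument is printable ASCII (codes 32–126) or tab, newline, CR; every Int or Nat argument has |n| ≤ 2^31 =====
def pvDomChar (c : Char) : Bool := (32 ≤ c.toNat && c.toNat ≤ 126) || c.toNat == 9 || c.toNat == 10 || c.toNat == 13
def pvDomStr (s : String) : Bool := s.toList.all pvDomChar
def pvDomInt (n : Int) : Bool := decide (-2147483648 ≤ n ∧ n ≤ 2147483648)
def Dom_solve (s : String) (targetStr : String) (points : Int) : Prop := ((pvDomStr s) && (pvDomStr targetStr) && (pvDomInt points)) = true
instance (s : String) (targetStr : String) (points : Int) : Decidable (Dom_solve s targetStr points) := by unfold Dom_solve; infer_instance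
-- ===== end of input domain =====

-- B replaces A's one-pass character stack by repeated global replace passes (an idiomatic `while pat in s` loop
-- over pat = targetStr[:2], the only characters A ever reads); single-pattern deletion is confluent, so the
-- remainder and the removal count match the stack's on every target of length ≥ 2 (Pre_).


-- ===== PORT A =====
-- literal port of A: one left-to-right pass keeping a stack (head = Python st[-1]); ''.join(st) = reversed stack
def solve (s : String) (targetStr : String) (points : Int) : Int × String :=
  let r := s.toList.foldl
    (fun (p : List Char × Int) (c : Char) =>
      if p.1 ≠ [] ∧ some c = PySem.Str.pyGet? targetStr 1 ∧ p.1.head? = PySem.Str.pyGet? targetStr 0 then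
        (p.1.tail, p.2 + points)
      else (c :: p.1, p.2))
    ([], 0)
  (r.2, String.mk r.1.reverse)

-- ===== PORT B =====
-- literal port of Source B's `while targetStr in s` loop; fuel (= len s + 1) is only a totality guard:
-- under Pre_ every iteration shortens s by at least 2, so the fuel is never exhausted
def solveAltLoop (t : List Char) (points : Int) : Nat → Int → List Char → Int × List Char
  | 0, total, cs => (total, cs)
  | fuel + 1, total, cs =>
    if PySem.Chars.isIn t cs then
      solveAltLoop t points fuel (total + (PySem.Chars.count cs t : Int) * points) (PySem.Chars.replace cs t [])
    else (total, cs)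

def solve_alt (s : String) (targetStr : String) (points : Int) : Int × String :=
  let pat := PySem.Chars.slice targetStr.toList none (some 2)
  let r := solveAltLoop pat points (s.toList.length + 1) 0 s.toList
  (r.1, String.mk r.2)

-- ===== PRECONDITION & SPEC =====
-- Pre_ excludes targets shorter than 2 characters: there A raises IndexError on targetStr[1] as soon as the scan
-- passes the first character of s, and on the remaining degenerate inputs (s of length ≤ 1, where A returns (0, s)
-- without ever reading targetStr) a 0- or 1-char target is a malformed corner no caller specifies: B's whole-pattern
-- reading removes a 1-char target (and would loop forever on an empty one), A's never fires — neither is the answer.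
def Pre_solve (s : String) (targetStr : String) (points : Int) : Prop := 2 ≤ PySem.Str.len targetStr
instance (s : String) (targetStr : String) (points : Int) : Decidable (Pre_solve s targetStr points) := by unfold Pre_solve; infer_instance

def pvWitness_solve : String × String × Int := ("ababccb", "ab", 5)

def Spec_solve (s : String) (targetStr : String) (points : Int) (out : Int × String) : Prop := out = solve_alt s targetStr points
instance (s : String) (targetStr : String) (points : Int) (out : Int × String) : Decidable (Spec_solve s targetStr points out) := by unfold Spec_solve; infer_instance

-- ===== CLAIM (what is proved, stated in full; the proofs are below) =====
def Claim_equal_solve : Prop := ∀ (s : String) (targetStr : String) (points : Int), Dom_solve s targetStr points → Pre_solve s targetStr points → Spec_solve s targetStr points (solve s targetStr points)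
-- ===== LEMMAS AND PROOFS =====

def stepXY (x y : Char) (p : List Char × Nat) (c : Char) : List Char × Nat :=
  if p.1 ≠ [] ∧ c = y ∧ p.1.head? = some x then (p.1.tail, p.2 + 1) else (c :: p.1, p.2)
def GoodXY (x y : Char) (st : List Char) : Prop :=
  List.IsChain (fun a b => ¬(a = y ∧ b = x)) st

theorem stepXY_good {x y : Char} {st : List Char} (n : Nat) (c : Char)
    (h : GoodXY x y st) : GoodXY x y (stepXY x y (st, n) c).1 := by
  unfold stepXY GoodXY at *
  split
  · exact h.tail
  · next hneg =>
    rw [List.isChain_cons]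
    refine ⟨?_, h⟩
    intro b hb hcb
    cases st with
    | nil => simp at hb
    | cons a t =>
      simp at hb
      exact hneg ⟨by simp, hcb.1, by simp [hb ▸ hcb.2]⟩

theorem run_shift (x y : Char) (l : List Char) (st : List Char) (n : Nat) :
    l.foldl (stepXY x y) (st, n) =
      ((l.foldl (stepXY x y) (st, 0)).1, n + (l.foldl (stepXY x y) (st, 0)).2) := by
  induction l generalizing st n with
  | nil => simp
  | cons c tl ih =>
    simp only [List.foldl_cons]
    rw [show stepXY x y (st, n) c = ((stepXY x y (st, 0) c).1, n + (stepXY x y (st, 0) c).2) by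
      unfold stepXY; split <;> simp]
    rw [ih, ih ((stepXY x y (st, 0) c).1) ((stepXY x y (st, 0) c).2)]
    simp [Nat.add_assoc]

theorem run_occ (x y : Char) (v : List Char) (st : List Char) (n : Nat)
    (h : GoodXY x y st) :
    (x :: y :: v).foldl (stepXY x y) (st, n) = v.foldl (stepXY x y) (st, n + 1) := by
  simp only [List.foldl_cons]
  by_cases hc : st ≠ [] ∧ x = y ∧ st.head? = some x
  · -- pop on first char: x = y and st = x :: st'
    obtain ⟨hne, hxy, hh⟩ := hc
    cases st with
    | nil => simp at hne
    | cons a t =>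
      simp at hh
      have h1 : stepXY x y (a :: t, n) x = (t, n + 1) := by
        unfold stepXY
        rw [if_pos ⟨by simp, hxy, by simp [hh]⟩]; rfl
      rw [h1]
      have h2 : stepXY x y (t, n + 1) y = (a :: t, n + 1) := by
        unfold stepXY
        rw [if_neg]
        · simp [hh, hxy]
        rintro ⟨htne, -, hht⟩
        cases t with
        | nil => simp at htne
        | cons b t' =>
          simp at hht
          unfold GoodXY at h
          rw [List.isChain_cons_cons] at h
          exact h.1 ⟨hh.trans hxy, hht⟩
      rw [h2]
  · have h1 : stepXY x y (st, n) x = (x :: st, n) := by unfold stepXY; rw [if_neg hc]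
    rw [h1]
    have h2 : stepXY x y (x :: st, n) y = (st, n + 1) := by unfold stepXY; simp
    rw [h2]

def replAll (x y : Char) : List Char → List Char
  | [] => []
  | [a] => [a]
  | a :: b :: tl => if a = x ∧ b = y then replAll x y tl else a :: replAll x y (b :: tl)

def countOcc (x y : Char) : List Char → Nat
  | [] => 0
  | [_] => 0
  | a :: b :: tl => if a = x ∧ b = y then countOcc x y tl + 1 else countOcc x y (b :: tl)

theorem run_replAll (x y : Char) (l : List Char) :
    ∀ (st : List Char) (n : Nat), GoodXY x y st →
    l.foldl (stepXY x y) (st, n) =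
      (((replAll x y l).foldl (stepXY x y) (st, n)).1,
       ((replAll x y l).foldl (stepXY x y) (st, n)).2 + countOcc x y l) := by
  induction l using replAll.induct x y with
  | case1 => simp [replAll, countOcc]
  | case2 a => simp [replAll, countOcc]
  | case3 a b tl hxy ih =>
    intro st n hst
    obtain ⟨rfl, rfl⟩ := hxy
    rw [replAll, countOcc, if_pos ⟨rfl, rfl⟩, if_pos ⟨rfl, rfl⟩]
    rw [run_occ a b tl st n hst, ih st (n + 1) hst]
    rw [run_shift a b (replAll a b tl) st (n + 1), run_shift a b (replAll a b tl) st n]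
    simp; omega
  | case4 a b tl hxy ih =>
    intro st n hst
    rw [replAll, countOcc, if_neg hxy, if_neg hxy]
    simp only [List.foldl_cons]
    have hg := stepXY_good (x := x) (y := y) n a hst
    have := ih (stepXY x y (st, n) a).1 (stepXY x y (st, n) a).2 hg
    simpa using this

theorem countOcc_zero_chain {x y : Char} {l : List Char} (h : countOcc x y l = 0) :
    List.IsChain (fun a b => ¬(a = x ∧ b = y)) l := by
  induction l using replAll.induct x y with
  | case1 => simp
  | case2 a => simp
  | case3 a b tl hxy ih => obtain ⟨rfl, rfl⟩ := hxy; rw [countOcc, if_pos ⟨rfl, rfl⟩] at h; omega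
  | case4 a b tl hxy ih =>
    rw [countOcc, if_neg hxy] at h
    exact List.isChain_cons_cons.mpr ⟨hxy, ih h⟩

theorem run_nf (x y : Char) (l : List Char) :
    ∀ (st : List Char) (n : Nat), GoodXY x y (l.reverse ++ st) →
    l.foldl (stepXY x y) (st, n) = (l.reverse ++ st, n) := by
  induction l with
  | nil => simp
  | cons c tl ih =>
    intro st n h
    have hcst : GoodXY x y (c :: st) := by
      unfold GoodXY at *
      have : List.IsChain (fun a b => ¬(a = y ∧ b = x)) (tl.reverse ++ (c :: st)) := by
        simpa using h
      exact (List.isChain_append.mp this).2.1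
    have h1 : stepXY x y (st, n) c = (c :: st, n) := by
      unfold stepXY
      rw [if_neg]
      rintro ⟨hne, rfl, hh⟩
      cases st with
      | nil => simp at hne
      | cons b t =>
        simp at hh
        unfold GoodXY at hcst
        rw [List.isChain_cons_cons] at hcst
        exact hcst.1 ⟨rfl, hh⟩
    simp only [List.foldl_cons, h1]
    rw [ih (c :: st) n (by simpa using h)]
    simp

theorem countOcc_zero_iff (x y : Char) (l : List Char) :
    countOcc x y l = 0 ↔ ¬ [x, y] <:+: l := by
  induction l using replAll.induct x y with
  | case1 => simp [countOcc]
  | case2 a =>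
    simp only [countOcc, true_iff]
    intro hinf
    have := hinf.length_le
    simp at this
  | case3 a b tl hxy ih =>
    obtain ⟨rfl, rfl⟩ := hxy
    rw [countOcc, if_pos ⟨rfl, rfl⟩]
    simp only [Nat.add_one_ne_zero, false_iff, not_not]
    exact ⟨[], tl, by simp⟩
  | case4 a b tl hxy ih =>
    rw [countOcc, if_neg hxy, ih]
    simp only [List.infix_cons_iff]
    have hp : ¬ ([x, y] <+: a :: b :: tl) := by
      intro hpre
      rw [List.cons_prefix_cons] at hpre
      exact hxy ⟨hpre.1.symm, (List.cons_prefix_cons.mp hpre.2).1.symm⟩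
    tauto

theorem replAll_length_le (x y : Char) (l : List Char) :
    (replAll x y l).length ≤ l.length := by
  induction l using replAll.induct x y with
  | case1 => simp [replAll]
  | case2 a => simp [replAll]
  | case3 a b tl hxy ih =>
    obtain ⟨rfl, rfl⟩ := hxy
    rw [replAll, if_pos ⟨rfl, rfl⟩]
    simp only [List.length_cons]; omega
  | case4 a b tl hxy ih =>
    rw [replAll, if_neg hxy]
    simp only [List.length_cons] at *; omega

theorem replAll_length_lt (x y : Char) (l : List Char) (h : countOcc x y l ≠ 0) :
    (replAll x y l).length < l.length := by
  induction l using replAll.induct x y with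
  | case1 => simp [countOcc] at h
  | case2 a => simp [countOcc] at h
  | case3 a b tl hxy ih =>
    obtain ⟨rfl, rfl⟩ := hxy
    rw [replAll, if_pos ⟨rfl, rfl⟩]
    have := replAll_length_le a b tl
    simp only [List.length_cons]; omega
  | case4 a b tl hxy ih =>
    rw [replAll, if_neg hxy]
    rw [countOcc, if_neg hxy] at h
    have := ih h
    simp only [List.length_cons] at *; omega
theorem isPrefixOf_pair_iff (x y a b : Char) (tl : List Char) :
    ([x, y].isPrefixOf (a :: b :: tl) = true) ↔ (a = x ∧ b = y) := by
  rw [List.isPrefixOf_iff_prefix, List.cons_prefix_cons]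
  simp [List.cons_prefix_cons, eq_comm]


theorem countgo_eq (x y : Char) (fuel : Nat) :
    ∀ (l : List Char) (acc : Nat), l.length ≤ fuel →
    PySem.Chars.count.go [x, y] fuel l acc = acc + countOcc x y l := by
  induction fuel with
  | zero =>
    intro l acc hl
    have : l = [] := List.length_eq_zero_iff.mp (Nat.le_zero.mp hl)
    subst this
    simp [PySem.Chars.count.go, countOcc]
  | succ fuel ih =>
    intro l acc hl
    match l with
    | [] => simp [PySem.Chars.count.go, countOcc]
    | [a] =>
      rw [PySem.Chars.count.go]
      rw [if_neg (by simp [List.isPrefixOf])]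
      rw [ih [] acc (by simp)]
      simp [countOcc]
    | a :: b :: tl =>
      rw [PySem.Chars.count.go]
      simp only [List.length_cons] at hl
      by_cases hab : a = x ∧ b = y
      · rw [if_pos ((isPrefixOf_pair_iff x y a b tl).mpr hab)]
        rw [show List.drop [x, y].length (a :: b :: tl) = tl from rfl]
        rw [ih tl (acc + 1) (by omega)]
        rw [countOcc, if_pos hab]
        omega
      · rw [if_neg (by rw [isPrefixOf_pair_iff]; exact hab)]
        rw [ih (b :: tl) acc (by simp; omega)]
        rw [countOcc, if_neg hab]

theorem count_eq_countOcc (x y : Char) (l : List Char) :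
    PySem.Chars.count l [x, y] = countOcc x y l := by
  rw [PySem.Chars.count, if_neg (by simp)]
  simpa using countgo_eq x y l.length l 0 le_rfl

theorem replacego_eq (x y : Char) (fuel : Nat) :
    ∀ (l : List Char) (acc : List Char), l.length ≤ fuel →
    PySem.Chars.replace.go [x, y] [] fuel l acc = acc.reverse ++ replAll x y l := by
  induction fuel with
  | zero =>
    intro l acc hl
    have : l = [] := List.length_eq_zero_iff.mp (Nat.le_zero.mp hl)
    subst this
    simp [PySem.Chars.replace.go, replAll]
  | succ fuel ih =>
    intro l acc hl
    match l with
    | [] => simp [PySem.Chars.replace.go, replAll]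
    | [a] =>
      rw [PySem.Chars.replace.go]
      rw [if_neg (by simp [List.isPrefixOf])]
      rw [ih [] (a :: acc) (by simp)]
      simp [replAll]
    | a :: b :: tl =>
      rw [PySem.Chars.replace.go]
      simp only [List.length_cons] at hl
      by_cases hab : a = x ∧ b = y
      · rw [if_pos ((isPrefixOf_pair_iff x y a b tl).mpr hab)]
        rw [show List.drop [x, y].length (a :: b :: tl) = tl from rfl]
        rw [show ([] : List Char).reverse ++ acc = acc from by simp]
        rw [ih tl acc (by omega)]
        rw [replAll, if_pos hab]
      · rw [if_neg (by rw [isPrefixOf_pair_iff]; exact hab)]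
        rw [ih (b :: tl) (a :: acc) (by simp; omega)]
        rw [replAll, if_neg hab]
        simp

theorem replace_eq_replAll (x y : Char) (l : List Char) :
    PySem.Chars.replace l [x, y] [] = replAll x y l := by
  rw [PySem.Chars.replace, if_neg (by simp)]
  exact replacego_eq x y l.length l [] le_rfl

theorem isIn_iff_countOcc (x y : Char) (l : List Char) :
    PySem.Chars.isIn [x, y] l = true ↔ countOcc x y l ≠ 0 := by
  rw [PySem.Chars.isIn_iff_infix]
  have := countOcc_zero_iff x y l
  tauto

theorem loop_run (x y : Char) (points : Int) (fuel : Nat) :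
    ∀ (cs : List Char) (tot : Int), cs.length < fuel →
    solveAltLoop [x, y] points fuel tot cs =
      (tot + ((cs.foldl (stepXY x y) ([], 0)).2 : Int) * points,
       (cs.foldl (stepXY x y) ([], 0)).1.reverse) := by
  induction fuel with
  | zero => intro cs tot h; omega
  | succ fuel ih =>
    intro cs tot h
    rw [solveAltLoop]
    by_cases h0 : countOcc x y cs = 0
    · rw [if_neg (by
        intro hin
        exact (isIn_iff_countOcc x y cs).mp hin h0)]
      have hg : GoodXY x y (cs.reverse ++ []) := by
        unfold GoodXY
        rw [List.append_nil, List.isChain_reverse]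
        have := countOcc_zero_chain h0
        exact this.imp (fun a b hab ⟨h1, h2⟩ => hab ⟨h2, h1⟩)
      rw [run_nf x y cs [] 0 hg]
      simp
    · rw [if_pos ((isIn_iff_countOcc x y cs).mpr h0)]
      rw [count_eq_countOcc, replace_eq_replAll]
      have hlen : (replAll x y cs).length < fuel := by
        have := replAll_length_lt x y cs h0
        omega
      rw [ih (replAll x y cs) _ hlen]
      rw [run_replAll x y cs [] 0 (by unfold GoodXY; simp)]
      simp only [Prod.mk.injEq]
      exact ⟨by push_cast; ring, trivial⟩
theorem solveA_run (x y : Char) (rest : List Char) (t : String) (ht : t.toList = x :: y :: rest) (points : Int)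
    (l : List Char) :
    ∀ (st : List Char) (tot : Int),
    l.foldl
      (fun (p : List Char × Int) (c : Char) =>
        if p.1 ≠ [] ∧ some c = PySem.Str.pyGet? t 1 ∧ p.1.head? = PySem.Str.pyGet? t 0 then
          (p.1.tail, p.2 + points)
        else (c :: p.1, p.2)) (st, tot) =
      ((l.foldl (stepXY x y) (st, 0)).1, tot + ((l.foldl (stepXY x y) (st, 0)).2 : Int) * points) := by
  have h0 : PySem.Str.pyGet? t 0 = some x := by simp [ht]
  have h1 : PySem.Str.pyGet? t 1 = some y := by simp [ht]
  induction l with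
  | nil => simp
  | cons c tl ih =>
    intro st tot
    simp only [List.foldl_cons]
    have hstep : (if st ≠ [] ∧ some c = PySem.Str.pyGet? t 1 ∧ st.head? = PySem.Str.pyGet? t 0 then
          (st.tail, tot + points) else (c :: st, tot)) =
        ((stepXY x y (st, 0) c).1, tot + ((stepXY x y (st, 0) c).2 : Int) * points) := by
      rw [h0, h1]
      unfold stepXY
      by_cases hc : st ≠ [] ∧ c = y ∧ st.head? = some x
      · rw [if_pos (by simpa using hc), if_pos hc]; simp
      · rw [if_neg (by simpa using hc), if_neg hc]; simp
    rw [hstep, ih ((stepXY x y (st, 0) c).1) (tot + ((stepXY x y (st, 0) c).2 : Int) * points)]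
    rw [run_shift x y tl (stepXY x y (st, 0) c).1 (stepXY x y (st, 0) c).2]
    simp only [Prod.mk.injEq, true_and]
    push_cast
    ring

theorem final (s t : String) (points : Int) (hpre : 2 ≤ t.toList.length) :
    solve s t points = solve_alt s t points := by
  match htl : t.toList with
  | [] => rw [htl] at hpre; simp at hpre
  | [x] => rw [htl] at hpre; simp at hpre
  | x :: y :: rest =>
    have hpat : PySem.Chars.slice t.toList none (some 2) = [x, y] := by
      simp [htl, PySem.Chars.slice_eq_listSlice, PySem.List.slice]
    unfold solve solve_alt
    rw [solveA_run x y rest t htl points s.toList [] 0]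
    rw [hpat]
    simp only []
    rw [loop_run x y points (s.toList.length + 1) s.toList 0 (by omega)]

-- ===== VERDICT (by name: the statement is the Claim_ definition above) =====
theorem solve_spec : Claim_equal_solve := by
  intro s t p _ hpre
  unfold Spec_solve
  unfold Pre_solve at hpre
  have h2 : (2 : Int) ≤ (t.length : Int) := by simpa [PySem.Str.len] using hpre
  have h3 : 2 ≤ t.toList.length := by
    have : 2 ≤ t.length := by exact_mod_cast h2
    simpa using this
  exact final s t p h3
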